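-- pv_equiv track=rewrite | github.com/EricTylerZ/prompt-history-builder | src/prompt-history-builder.py | parse_chat
-- ===== SOURCE A (Python) =====
-- def parse_chat(chat_text):
--     """Parse chat into user prompts and LLM responses."""
--     lines = chat_text.splitlines()
--     user_prompts = []
--     llm_responses = []
--     current_block = []
--     is_user = False
--
--     for line in lines:
--         line = line.strip()
--         if line.startswith("[User"):
--             if current_block:
--                 if is_user:
--                     user_prompts.append("\n".join(current_block))
--                 else:
--                     llm_responses.append("\n".join(current_block))
--             current_block = [line]
--             is_user = True
--         elif line.startswith("[Grok"):
--             if current_block: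
--                 if is_user:
--                     user_prompts.append("\n".join(current_block))
--                 else:
--                     llm_responses.append("\n".join(current_block))
--             current_block = [line]
--             is_user = False
--         elif line and not line.startswith("[Note"):
--             current_block.append(line)
--
--     if current_block:
--         if is_user:
--             user_prompts.append("\n".join(current_block))
--         else:
--             llm_responses.append("\n".join(current_block))
--
--     return user_prompts, llm_responses
-- ===== SOURCE B (Python) =====
-- def parse_chat(chat_text):
--     """Parse chat into user prompts and LLM responses."""
--     # Bucket lines by header ordinal: the key of a line is the number of
--     # '[User'/'[Grok' header lines seen up to and including it (0 = content
--     # before any header); empty and '[Note' lines are dropped.  Each bucket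
--     # is one block; classify it by its first line.
--     groups = {}
--     n = 0
--     for raw in chat_text.splitlines():
--         s = raw.strip()
--         if s.startswith("[User") or s.startswith("[Grok"):
--             n += 1
--             groups[n] = [s]
--         elif s and not s.startswith("[Note"):
--             groups.setdefault(n, []).append(s)
--     user_prompts = []
--     llm_responses = []
--     for k in sorted(groups):
--         block = groups[k]
--         if block[0].startswith("[User"):
--             user_prompts.append("\n".join(block))
--         else:
--             llm_responses.append("\n".join(block))
--     return user_prompts, llm_responses
-- ===== Notes on version B (the rewrite author's own statement) =====
-- stated objective: alternative
-- what changed: Replaces A's running block accumulator with is_user flag and flush-on-header by a dict-based bucketing: each kept line is keyed by a running count of headers seen so far, buckets are collected in a dict, and a second loop over the sorted keys classifies each bucket by its first line.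
import Mathlib
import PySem

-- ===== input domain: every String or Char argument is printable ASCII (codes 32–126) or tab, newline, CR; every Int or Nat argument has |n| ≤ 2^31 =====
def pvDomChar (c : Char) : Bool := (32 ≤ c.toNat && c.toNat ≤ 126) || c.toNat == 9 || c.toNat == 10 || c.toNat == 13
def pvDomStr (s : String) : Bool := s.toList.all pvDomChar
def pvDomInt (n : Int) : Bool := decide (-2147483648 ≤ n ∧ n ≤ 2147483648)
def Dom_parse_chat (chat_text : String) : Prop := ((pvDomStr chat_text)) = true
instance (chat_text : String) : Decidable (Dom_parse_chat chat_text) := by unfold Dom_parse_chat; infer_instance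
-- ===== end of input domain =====

-- B replaces A's running block accumulator / is_user flag / flush-on-header by dict bucketing:
-- lines are keyed by a running header count, then the sorted keys are emitted and classified.

-- ===== PORT A =====
-- the thrice-inlined "if current_block: append '\n'.join(current_block) to one of the lists"
def pcFlush (u l : List String) (cur : List String) (iu : Bool) : List String × List String :=
  if cur ≠ [] then
    if iu then (u ++ [PySem.Str.join "\n" cur], l)
    else (u, l ++ [PySem.Str.join "\n" cur])
  else (u, l)

def pcLoopA : List String → List String → List String → List String → Bool → List String × List String
  | [], u, l, cur, iu => pcFlush u l cur iu
  | line :: rest, u, l, cur, iu =>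
    let s := PySem.Str.strip line
    if PySem.Str.startswith s "[User" then
      let p := pcFlush u l cur iu
      pcLoopA rest p.1 p.2 [s] true
    else if PySem.Str.startswith s "[Grok" then
      let p := pcFlush u l cur iu
      pcLoopA rest p.1 p.2 [s] false
    else if s ≠ "" && !PySem.Str.startswith s "[Note" then
      pcLoopA rest u l (cur ++ [s]) iu
    else
      pcLoopA rest u l cur iu

def parse_chat (chat_text : String) : List String × List String :=
  pcLoopA (PySem.Str.splitlines chat_text) [] [] [] false

-- ===== PORT B =====
-- first loop of Source B: bucket stripped kept lines into groups keyed by the running header count n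
def pbLoop : List String → Int → PySem.Dict Int (List String) → PySem.Dict Int (List String)
  | [], _, d => d
  | raw :: rest, n, d =>
    let s := PySem.Str.strip raw
    if PySem.Str.startswith s "[User" || PySem.Str.startswith s "[Grok" then
      pbLoop rest (n + 1) (d.insert (n + 1) [s])
    else if s ≠ "" && !PySem.Str.startswith s "[Note" then
      pbLoop rest n (d.modify n [] (· ++ [s]))
    else
      pbLoop rest n d

-- block[0].startswith("[User"); buckets are never empty, the [] case is unreachable
def pcIsUserBlock (b : List String) : Bool :=
  match b with
  | x :: _ => PySem.Str.startswith x "[User"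
  | [] => false

-- second loop of Source B: for k in sorted(groups): classify groups[k]
def pbEmit : List Int → PySem.Dict Int (List String) → List String × List String → List String × List String
  | [], _, acc => acc
  | k :: ks, d, (u, l) =>
    let b := d.getD k []
    if pcIsUserBlock b then pbEmit ks d (u ++ [PySem.Str.join "\n" b], l)
    else pbEmit ks d (u, l ++ [PySem.Str.join "\n" b])

def parse_chat_alt (chat_text : String) : List String × List String :=
  let groups := pbLoop (PySem.Str.splitlines chat_text) 0 PySem.Dict.empty
  pbEmit (PySem.List.sorted (PySem.Dict.keys groups) (fun k => k) false) groups ([], [])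

-- ===== PRECONDITION & SPEC =====
def Spec_parse_chat (chat_text : String) (out : List String × List String) : Prop := out = parse_chat_alt chat_text
instance (chat_text : String) (out : List String × List String) : Decidable (Spec_parse_chat chat_text out) := by unfold Spec_parse_chat; infer_instance

-- ===== CLAIM (what is proved, stated in full; the proofs are below) =====
def Claim_equal_parse_chat : Prop := ∀ (chat_text : String), Dom_parse_chat chat_text → Spec_parse_chat chat_text (parse_chat chat_text)

-- ===== LEMMAS AND PROOFS =====

-- proof-only bridge: the list of blocks both programs implicitly build
def pcLoopB : List String → List (List String) → List String → List (List String)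
  | [], blocks, cur => if cur ≠ [] then blocks ++ [cur] else blocks
  | line :: rest, blocks, cur =>
    let s := PySem.Str.strip line
    if PySem.Str.startswith s "[User" || PySem.Str.startswith s "[Grok" then
      pcLoopB rest (if cur ≠ [] then blocks ++ [cur] else blocks) [s]
    else if s ≠ "" && !PySem.Str.startswith s "[Note" then
      pcLoopB rest blocks (cur ++ [s])
    else
      pcLoopB rest blocks cur

-- proof-only bridge: blocks numbered consecutively from c
def pcEnum : Int → List (List String) → List (Int × List String)
  | _, [] => []
  | c, b :: bs => (c, b) :: pcEnum (c + 1) bs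

theorem pcLoopB_acc (lines : List String) (blocks : List (List String)) (cur : List String) :
    pcLoopB lines blocks cur = blocks ++ pcLoopB lines [] cur := by
  induction lines generalizing blocks cur with
  | nil => simp [pcLoopB]; split <;> simp
  | cons line rest ih =>
    simp only [pcLoopB]
    split
    · rw [ih, ih (if cur ≠ [] then [] ++ [cur] else [])]
      split <;> simp
    · split
      · exact ih blocks (cur ++ [PySem.Str.strip line])
      · exact ih blocks cur

theorem pcMain (lines : List String) (cur u l : List String) :
    pcLoopA lines u l cur (pcIsUserBlock cur) =
      (u ++ ((pcLoopB lines [] cur).filter pcIsUserBlock).map (PySem.Str.join "\n"),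
       l ++ ((pcLoopB lines [] cur).filter (fun b => !pcIsUserBlock b)).map (PySem.Str.join "\n")) := by
  induction lines generalizing cur u l with
  | nil =>
    simp only [pcLoopA, pcLoopB, pcFlush]
    by_cases hc : cur = []
    · simp [hc]
    · simp only [hc, ne_eq, not_false_eq_true, if_true]
      by_cases hu : pcIsUserBlock cur = true <;> simp [hu]
  | cons line rest ih =>
    simp only [pcLoopA, pcLoopB]
    set s := PySem.Str.strip line with hs
    by_cases h1 : PySem.Str.startswith s "[User" = true
    · have hor : (PySem.Str.startswith s "[User" || PySem.Str.startswith s "[Grok") = true := by rw [h1, Bool.true_or]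
      have hnew : pcIsUserBlock [s] = true := h1
      rw [if_pos h1, if_pos hor]
      have h' := ih [s] (pcFlush u l cur (pcIsUserBlock cur)).1 (pcFlush u l cur (pcIsUserBlock cur)).2
      rw [hnew] at h'
      rw [h']
      by_cases hc : cur = []
      · simp [hc, pcFlush]
      · simp only [hc, ne_eq, not_false_eq_true, if_true]
        rw [pcLoopB_acc rest ([] ++ [cur]) [s]]
        by_cases hu : pcIsUserBlock cur = true <;>
          simp [pcFlush, hc, hu]
    · by_cases h2 : PySem.Str.startswith s "[Grok" = true
      · have hor : (PySem.Str.startswith s "[User" || PySem.Str.startswith s "[Grok") = true := by rw [h2, Bool.or_true]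
        have hnew : pcIsUserBlock [s] = false := by
          simp only [pcIsUserBlock]
          exact Bool.eq_false_iff.mpr h1
        rw [if_neg h1, if_pos h2, if_pos hor]
        have h' := ih [s] (pcFlush u l cur (pcIsUserBlock cur)).1 (pcFlush u l cur (pcIsUserBlock cur)).2
        rw [hnew] at h'
        rw [h']
        by_cases hc : cur = []
        · simp [hc, pcFlush]
        · simp only [hc, ne_eq, not_false_eq_true, if_true]
          rw [pcLoopB_acc rest ([] ++ [cur]) [s]]
          by_cases hu : pcIsUserBlock cur = true <;>
            simp [pcFlush, hc, hu]
      · have hor : ¬ ((PySem.Str.startswith s "[User" || PySem.Str.startswith s "[Grok") = true) := by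
          rw [Bool.eq_false_iff.mpr h1, Bool.eq_false_iff.mpr h2, Bool.or_self]
          exact Bool.false_ne_true
        rw [if_neg h1, if_neg h2, if_neg hor]
        by_cases h3 : (s ≠ "" && !PySem.Str.startswith s "[Note") = true
        · rw [if_pos h3, if_pos h3]
          have hsame : pcIsUserBlock (cur ++ [s]) = pcIsUserBlock cur := by
            cases cur with
            | nil =>
              simp only [List.nil_append, pcIsUserBlock]
              exact Bool.eq_false_iff.mpr h1
            | cons x xs => simp [pcIsUserBlock]
          have h' := ih (cur ++ [s]) u l
          rw [hsame] at h'
          exact h'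
        · rw [if_neg h3, if_neg h3]
          exact ih cur u l

-- ---- pcEnum basic facts ----
theorem pcEnum_append_singleton (c : Int) (bs : List (List String)) (b : List String) :
    pcEnum c (bs ++ [b]) = pcEnum c bs ++ [(c + bs.length, b)] := by
  induction bs generalizing c with
  | nil => simp [pcEnum]
  | cons x xs ih =>
    have harith : c + 1 + (xs.length : Int) = c + ((xs.length : Int) + 1) := by ring
    simp [pcEnum, ih (c + 1), harith]

theorem pcEnum_fst_bounds (c : Int) (bs : List (List String)) :
    ∀ p ∈ pcEnum c bs, c ≤ p.1 ∧ p.1 < c + bs.length := by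
  induction bs generalizing c with
  | nil => simp [pcEnum]
  | cons x xs ih =>
    intro p hp
    simp only [pcEnum, List.mem_cons] at hp
    rcases hp with h | h
    · subst h
      simp only [List.length_cons]
      push_cast
      omega
    · have := ih (c + 1) p h
      simp only [List.length_cons]
      push_cast at this ⊢
      omega

theorem pcEnum_fst_nodup (c : Int) (bs : List (List String)) :
    ((pcEnum c bs).map Prod.fst).Nodup := by
  induction bs generalizing c with
  | nil => simp [pcEnum]
  | cons x xs ih =>
    simp only [pcEnum, List.map_cons, List.nodup_cons]
    refine ⟨?_, ih (c + 1)⟩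
    intro hmem
    rcases List.mem_map.mp hmem with ⟨p, hp, hfst⟩
    have := pcEnum_fst_bounds (c + 1) xs p hp
    omega

theorem pcEnum_snd (c : Int) (bs : List (List String)) :
    (pcEnum c bs).map Prod.snd = bs := by
  induction bs generalizing c with
  | nil => simp [pcEnum]
  | cons x xs ih => simp [pcEnum, ih (c + 1)]

theorem pcEnum_fst_pairwise (c : Int) (bs : List (List String)) :
    ((pcEnum c bs).map Prod.fst).Pairwise (· < ·) := by
  induction bs generalizing c with
  | nil => simp [pcEnum]
  | cons x xs ih =>
    simp only [pcEnum, List.map_cons, List.pairwise_cons]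
    refine ⟨?_, ih (c + 1)⟩
    intro k hk
    rcases List.mem_map.mp hk with ⟨p, hp, rfl⟩
    have := pcEnum_fst_bounds (c + 1) xs p hp
    omega

-- ---- B's first loop builds exactly the numbered blocks ----
theorem pbLoop_inv (lines : List String) :
    ∀ (c : Int) (closed : List (List String)) (cur : List String)
      (d : PySem.Dict Int (List String)), cur ≠ [] →
      d.items = pcEnum c (closed ++ [cur]) →
      (pbLoop lines (c + closed.length) d).items
        = pcEnum c (closed ++ pcLoopB lines [] cur) := by
  induction lines with
  | nil =>
    intro c closed cur d hcur hd
    simpa [pbLoop, pcLoopB, hcur] using hd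
  | cons raw rest ih =>
    intro c closed cur d hcur hd
    simp only [pbLoop, pcLoopB, PySem.Dict.modify]
    set s := PySem.Str.strip raw with hs
    have hkeys : d.keys = (pcEnum c (closed ++ [cur])).map Prod.fst := by
      simp only [PySem.Dict.keys, hd]
    have hnd : d.keys.Nodup := by rw [hkeys]; exact pcEnum_fst_nodup _ _
    by_cases hh : (PySem.Str.startswith s "[User" || PySem.Str.startswith s "[Grok") = true
    · rw [if_pos hh, if_pos hh]
      have hfresh : d.contains (c + closed.length + 1) = false := by
        rw [PySem.Dict.contains_eq_decide_mem_keys, hkeys]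
        simp only [decide_eq_false_iff_not]
        intro hmem
        rcases List.mem_map.mp hmem with ⟨p, hp, hfst⟩
        have hb := pcEnum_fst_bounds c (closed ++ [cur]) p hp
        simp only [List.length_append, List.length_cons, List.length_nil] at hb
        push_cast at hb
        omega
      have hKey : c + (((closed ++ [cur]).length : Nat) : Int) = c + closed.length + 1 := by
        push_cast [List.length_append, List.length_cons, List.length_nil]
        ring
      have hd' : (d.insert (c + closed.length + 1) [s]).items
          = pcEnum c ((closed ++ [cur]) ++ [[s]]) := by
        rw [PySem.Dict.items_insert_of_not_contains d [s] hfresh, hd,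
            pcEnum_append_singleton c (closed ++ [cur]) [s], hKey]
      have hstep := ih c (closed ++ [cur]) [s]
          (d.insert (c + closed.length + 1) [s]) (by simp) hd'
      rw [hKey] at hstep
      rw [hstep, pcLoopB_acc rest (if cur ≠ [] then [] ++ [cur] else []) [s]]
      simp [hcur, List.append_assoc]
    · by_cases hk : (s ≠ "" && !PySem.Str.startswith s "[Note") = true
      · rw [if_neg hh, if_pos hk, if_neg hh, if_pos hk]
        have hmem : (c + (closed.length : Int), cur) ∈ d.items := by
          rw [hd, pcEnum_append_singleton]
          simp
        have hget : d.getD (c + closed.length) [] = cur :=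
          PySem.Dict.getD_of_mem_items d hmem hnd []
        have hcont : d.contains (c + closed.length) = true := by
          rw [PySem.Dict.contains_eq_decide_mem_keys, hkeys]
          simp only [decide_eq_true_eq]
          exact List.mem_map.mpr ⟨_, by rw [← hd]; exact hmem, rfl⟩
        have hident : (pcEnum c closed).map
            (fun p => if (p.1 == c + (closed.length : Int)) = true
                      then (c + (closed.length : Int), cur ++ [s]) else p)
            = pcEnum c closed := by
          conv_rhs => rw [← List.map_id (pcEnum c closed)]
          apply List.map_congr_left
          intro p hp
          have hb := pcEnum_fst_bounds c closed p hp
          have hne : (p.1 == c + (closed.length : Int)) = false := by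
            simp only [beq_eq_false_iff_ne, ne_eq]
            omega
          simp [hne]
        have hd' : (d.insert (c + closed.length) (cur ++ [s])).items
            = pcEnum c (closed ++ [cur ++ [s]]) := by
          rw [PySem.Dict.items_insert_of_contains d (cur ++ [s]) hcont, hd,
              pcEnum_append_singleton, pcEnum_append_singleton, List.map_append]
          rw [hident]
          simp
        rw [hget]
        exact ih c closed (cur ++ [s]) _ (by simp) hd'
      · rw [if_neg hh, if_neg hk, if_neg hh, if_neg hk]
        exact ih c closed cur d hcur hd

theorem pbLoop_start (lines : List String) (n : Int) :
    (pbLoop lines n PySem.Dict.empty).items = pcEnum (n + 1) (pcLoopB lines [] [])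
    ∨ (pbLoop lines n PySem.Dict.empty).items = pcEnum n (pcLoopB lines [] []) := by
  induction lines generalizing n with
  | nil => left; simp [pbLoop, pcLoopB, pcEnum, PySem.Dict.empty]
  | cons raw rest ih =>
    simp only [pbLoop, pcLoopB, PySem.Dict.modify]
    set s := PySem.Str.strip raw with hs
    by_cases hh : (PySem.Str.startswith s "[User" || PySem.Str.startswith s "[Grok") = true
    · left
      rw [if_pos hh, if_pos hh]
      have hd' : ((PySem.Dict.empty : PySem.Dict Int (List String)).insert (n + 1) [s]).items
          = pcEnum (n + 1) ([] ++ [[s]]) := by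
        rw [PySem.Dict.items_insert_of_not_contains _ [s] (PySem.Dict.contains_empty _)]
        rfl
      have hstep := pbLoop_inv rest (n + 1) [] [s] _ (by simp) hd'
      simpa using hstep
    · by_cases hk : (s ≠ "" && !PySem.Str.startswith s "[Note") = true
      · right
        rw [if_neg hh, if_pos hk, if_neg hh, if_pos hk]
        rw [PySem.Dict.getD_empty]
        have hd' : ((PySem.Dict.empty : PySem.Dict Int (List String)).insert n ([] ++ [s])).items
            = pcEnum n ([] ++ [[s]]) := by
          rw [PySem.Dict.items_insert_of_not_contains _ _ (PySem.Dict.contains_empty _)]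
          rfl
        have hstep := pbLoop_inv rest n [] [s] _ (by simp) hd'
        simpa using hstep
      · rw [if_neg hh, if_neg hk, if_neg hh, if_neg hk]
        exact ih n

-- ---- B's second loop over in-dict keys is the filter/map classification ----
theorem pbEmit_spec (d : PySem.Dict Int (List String)) (hnd : (PySem.Dict.keys d).Nodup) :
    ∀ (ps : List (Int × List String)) (u l : List String),
      (∀ p ∈ ps, p ∈ d.items) →
      pbEmit (ps.map Prod.fst) d (u, l) =
        (u ++ ((ps.map Prod.snd).filter pcIsUserBlock).map (PySem.Str.join "\n"),
         l ++ ((ps.map Prod.snd).filter (fun b => !pcIsUserBlock b)).map (PySem.Str.join "\n")) := by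
  intro ps
  induction ps with
  | nil => intro u l _; simp [pbEmit]
  | cons p ps ih =>
    intro u l hmem
    obtain ⟨k, b⟩ := p
    simp only [List.map_cons, pbEmit]
    have hget : d.getD k [] = b :=
      PySem.Dict.getD_of_mem_items d (hmem _ (by simp)) hnd []
    rw [hget]
    have hmem' : ∀ q ∈ ps, q ∈ d.items := fun q hq => hmem q (List.mem_cons_of_mem _ hq)
    by_cases hu : pcIsUserBlock b = true
    · rw [if_pos hu, ih (u ++ [PySem.Str.join "\n" b]) l hmem']
      simp [hu]
    · rw [if_neg hu, ih u (l ++ [PySem.Str.join "\n" b]) hmem']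
      simp [Bool.eq_false_iff.mpr hu]

theorem pbFinal (lines : List String) :
    pbEmit (PySem.List.sorted (PySem.Dict.keys (pbLoop lines 0 PySem.Dict.empty)) (fun k => k) false)
        (pbLoop lines 0 PySem.Dict.empty) ([], []) =
      (((pcLoopB lines [] []).filter pcIsUserBlock).map (PySem.Str.join "\n"),
       ((pcLoopB lines [] []).filter (fun b => !pcIsUserBlock b)).map (PySem.Str.join "\n")) := by
  obtain ⟨c, h⟩ : ∃ c : Int,
      (pbLoop lines 0 PySem.Dict.empty).items = pcEnum c (pcLoopB lines [] []) := by
    rcases pbLoop_start lines 0 with h | h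
    · exact ⟨0 + 1, h⟩
    · exact ⟨0, h⟩
  · have hkeys : (pbLoop lines 0 PySem.Dict.empty).keys
        = (pcEnum c (pcLoopB lines [] [])).map Prod.fst := by
      simp only [PySem.Dict.keys, h]
    have hnd : (pbLoop lines 0 PySem.Dict.empty).keys.Nodup := by
      rw [hkeys]; exact pcEnum_fst_nodup _ _
    have hsorted : PySem.List.sorted (PySem.Dict.keys (pbLoop lines 0 PySem.Dict.empty))
        (fun k => k) false = (pbLoop lines 0 PySem.Dict.empty).keys := by
      apply PySem.List.sorted_eq_of_perm_of_pairwise_lt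
      · exact List.Perm.refl _
      · rw [hkeys]; exact pcEnum_fst_pairwise _ _
    rw [hsorted, hkeys,
        pbEmit_spec _ hnd _ [] [] (by intro p hp; rw [h]; exact hp),
        pcEnum_snd]
    simp

-- ===== VERDICT (by name: the statement is the Claim_ definition above) =====
theorem parse_chat_spec : Claim_equal_parse_chat := by
  intro ct _
  unfold Spec_parse_chat parse_chat parse_chat_alt
  have hA := pcMain (PySem.Str.splitlines ct) [] [] []
  rw [show pcIsUserBlock [] = false from rfl] at hA
  rw [hA, pbFinal]
  simp
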